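-- pv_equiv track=rewrite | github.com/BitRaptors/Archie | backend/src/infrastructure/analysis/directory_summarizer.py | _analyze_file_names
-- ===== SOURCE A (Python) =====
-- def _analyze_file_names(files: list[str]) -> str:
--     """Analyze file names to infer purpose.
--
--     Args:
--         files: List of file names
--
--     Returns:
--         Inferred purpose or empty string
--     """
--     files_lower = [f.lower() for f in files]
--
--     if any("route" in f or "endpoint" in f for f in files_lower):
--         return "API routing and endpoints"
--     if any("service" in f for f in files_lower):
--         return "Business logic services"
--     if any("repository" in f or "repo" in f for f in files_lower):
--         return "Data access layer"
--     if any("model" in f or "entity" in f for f in files_lower):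
--         return "Data models and entities"
--     if any("controller" in f for f in files_lower):
--         return "Request handling controllers"
--     if any("middleware" in f for f in files_lower):
--         return "Request/response middleware"
--     if any("hook" in f for f in files_lower):
--         return "React/Vue hooks"
--     if any("context" in f or "provider" in f for f in files_lower):
--         return "State/context providers"
--     if any("util" in f or "helper" in f for f in files_lower):
--         return "Utility functions"
--
--     return ""
-- ===== SOURCE B (Python) =====
-- _RULES = [
--     (["route", "endpoint"], "API routing and endpoints"),
--     (["service"], "Business logic services"),
--     (["repository", "repo"], "Data access layer"),
--     (["model", "entity"], "Data models and entities"),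
--     (["controller"], "Request handling controllers"),
--     (["middleware"], "Request/response middleware"),
--     (["hook"], "React/Vue hooks"),
--     (["context", "provider"], "State/context providers"),
--     (["util", "helper"], "Utility functions"),
-- ]
--
--
-- def _first_rule_index(fl: str) -> int:
--     """Index of the first rule one of whose keywords occurs in fl, else len(_RULES)."""
--     for i, (keywords, _label) in enumerate(_RULES):
--         if any(k in fl for k in keywords):
--             return i
--     return len(_RULES)
--
--
-- def _analyze_file_names(files: list[str]) -> str:
--     best = len(_RULES)
--     for f in files:
--         best = min(best, _first_rule_index(f.lower()))
--     return _RULES[best][1] if best < len(_RULES) else ""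
-- ===== Notes on version B (the rewrite author's own statement) =====
-- stated objective: alternative
-- what changed: Replaced the nine sequential any-scans over the whole file list by a single pass over the files with an ordered rule table, tracking the minimum matching rule index per file.
import Mathlib
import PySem

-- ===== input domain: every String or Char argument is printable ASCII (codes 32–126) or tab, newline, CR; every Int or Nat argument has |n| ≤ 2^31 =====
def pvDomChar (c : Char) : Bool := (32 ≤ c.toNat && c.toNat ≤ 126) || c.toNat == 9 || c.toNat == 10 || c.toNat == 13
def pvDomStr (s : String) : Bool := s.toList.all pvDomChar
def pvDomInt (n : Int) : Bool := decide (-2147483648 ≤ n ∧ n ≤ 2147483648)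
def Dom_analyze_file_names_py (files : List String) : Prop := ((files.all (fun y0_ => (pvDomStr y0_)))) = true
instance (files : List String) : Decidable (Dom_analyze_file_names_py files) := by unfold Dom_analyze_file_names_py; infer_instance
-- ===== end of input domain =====

-- B replaces A's nine sequential any-scans of the file list by one pass over the files
-- with an ordered rule table, tracking the minimum matching rule index (objective: alternative).

-- ===== PORT A =====
def analyze_file_names_py (files : List String) : String :=
  let fl := files.map PySem.Str.lower
  if fl.any (fun f => PySem.Str.isIn "route" f || PySem.Str.isIn "endpoint" f) then "API routing and endpoints"
  else if fl.any (fun f => PySem.Str.isIn "service" f) then "Business logic services"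
  else if fl.any (fun f => PySem.Str.isIn "repository" f || PySem.Str.isIn "repo" f) then "Data access layer"
  else if fl.any (fun f => PySem.Str.isIn "model" f || PySem.Str.isIn "entity" f) then "Data models and entities"
  else if fl.any (fun f => PySem.Str.isIn "controller" f) then "Request handling controllers"
  else if fl.any (fun f => PySem.Str.isIn "middleware" f) then "Request/response middleware"
  else if fl.any (fun f => PySem.Str.isIn "hook" f) then "React/Vue hooks"
  else if fl.any (fun f => PySem.Str.isIn "context" f || PySem.Str.isIn "provider" f) then "State/context providers"
  else if fl.any (fun f => PySem.Str.isIn "util" f || PySem.Str.isIn "helper" f) then "Utility functions"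
  else ""

-- ===== PORT B =====
def pvRules : List (List String × String) :=
  [ (["route", "endpoint"], "API routing and endpoints"),
    (["service"], "Business logic services"),
    (["repository", "repo"], "Data access layer"),
    (["model", "entity"], "Data models and entities"),
    (["controller"], "Request handling controllers"),
    (["middleware"], "Request/response middleware"),
    (["hook"], "React/Vue hooks"),
    (["context", "provider"], "State/context providers"),
    (["util", "helper"], "Utility functions") ]

-- index of the first rule one of whose keywords occurs in fl, else the number of rules
def pvFirstRuleIndexAux (rs : List (List String × String)) (fl : String) : Nat :=
  match rs with
  | [] => 0
  | (keywords, _) :: rest =>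
      if keywords.any (fun k => PySem.Str.isIn k fl) then 0
      else pvFirstRuleIndexAux rest fl + 1

def pvBest (files : List String) : Nat :=
  files.foldl (fun b f => min b (pvFirstRuleIndexAux pvRules (PySem.Str.lower f))) pvRules.length

def analyze_file_names_py_alt (files : List String) : String :=
  if pvBest files < pvRules.length then (pvRules.getD (pvBest files) ([], "")).2 else ""

-- ===== PRECONDITION & SPEC =====
def Spec_analyze_file_names_py (files : List String) (out : String) : Prop := out = analyze_file_names_py_alt files
instance (files : List String) (out : String) : Decidable (Spec_analyze_file_names_py files out) := by unfold Spec_analyze_file_names_py; infer_instance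

-- ===== CLAIM (what is proved, stated in full; the proofs are below) =====
def Claim_equal_analyze_file_names_py : Prop := ∀ (files : List String), Dom_analyze_file_names_py files → Spec_analyze_file_names_py files (analyze_file_names_py files)

-- ===== LEMMAS AND PROOFS =====

-- "file f matches rule j" (proof-side abbreviation)
def pvMatch (j : Nat) (f : String) : Bool :=
  (pvRules.getD j ([], "")).1.any (fun k => PySem.Str.isIn k (PySem.Str.lower f))

lemma pvFirstRuleIndexAux_le_iff (rs : List (List String × String)) (fl : String) (i : Nat) :
    pvFirstRuleIndexAux rs fl ≤ i ↔
      (rs.length ≤ i ∨ ((rs.take (i+1)).any (fun r => r.1.any (fun k => PySem.Str.isIn k fl))) = true) := by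
  induction rs generalizing i with
  | nil => simp [pvFirstRuleIndexAux]
  | cons r rest ih =>
    obtain ⟨ks, lab⟩ := r
    simp only [pvFirstRuleIndexAux]
    cases h : ks.any (fun k => PySem.Str.isIn k fl) with
    | true =>
      rw [if_pos rfl]
      have htk : ((List.take (i+1) ((ks, lab) :: rest)).any
          (fun r => r.1.any (fun k => PySem.Str.isIn k fl))) = true := by
        rw [List.take_succ_cons, List.any_cons, Bool.or_eq_true]
        exact Or.inl h
      exact iff_of_true (Nat.zero_le i) (Or.inr htk)
    | false =>
      rw [if_neg Bool.false_ne_true]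
      cases i with
      | zero =>
        have hh : ((ks, lab).1.any fun k => PySem.Str.isIn k fl) = false := h
        rw [List.take_succ_cons, List.take_zero, List.any_cons, List.any_nil, Bool.or_false, hh]
        simp
      | succ j =>
        rw [List.take_succ_cons, List.any_cons]
        have hh : ((ks, lab).1.any fun k => PySem.Str.isIn k fl) = false := h
        rw [hh, Bool.false_or, List.length_cons]
        rw [Nat.add_le_add_iff_right, Nat.add_le_add_iff_right]
        exact ih j

lemma pvBest_le_iff (files : List String) (i : Nat) :
    pvBest files ≤ i ↔
      (9 ≤ i ∨ ∃ f ∈ files, ((pvRules.take (i+1)).any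
          (fun r => r.1.any (fun k => PySem.Str.isIn k (PySem.Str.lower f)))) = true) := by
  have gen : ∀ (l : List String) (a : Nat),
      l.foldl (fun b f => min b (pvFirstRuleIndexAux pvRules (PySem.Str.lower f))) a ≤ i ↔
        (a ≤ i ∨ ∃ f ∈ l, pvFirstRuleIndexAux pvRules (PySem.Str.lower f) ≤ i) := by
    intro l
    induction l with
    | nil => simp
    | cons x xs ih =>
      intro a
      rw [List.foldl_cons, ih]
      simp only [min_le_iff, List.mem_cons]
      constructor
      · rintro (hm | ⟨f, hf, hle⟩)
        · rcases hm with hm | hm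
          · exact Or.inl hm
          · exact Or.inr ⟨x, Or.inl rfl, hm⟩
        · exact Or.inr ⟨f, Or.inr hf, hle⟩
      · rintro (hm | ⟨f, hf, hle⟩)
        · exact Or.inl (Or.inl hm)
        · rcases hf with rfl | hf
          · exact Or.inl (Or.inr hle)
          · exact Or.inr ⟨f, hf, hle⟩
  have hlen : pvRules.length = 9 := by decide
  unfold pvBest
  rw [gen, hlen]
  constructor
  · rintro (hm | ⟨f, hf, hle⟩)
    · exact Or.inl hm
    · rcases (pvFirstRuleIndexAux_le_iff pvRules (PySem.Str.lower f) i).mp hle with hm | hm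
      · exact Or.inl (hlen ▸ hm)
      · exact Or.inr ⟨f, hf, hm⟩
  · rintro (hm | ⟨f, hf, hm⟩)
    · exact Or.inl hm
    · exact Or.inr ⟨f, hf, (pvFirstRuleIndexAux_le_iff pvRules (PySem.Str.lower f) i).mpr (Or.inr hm)⟩

lemma pvRules_getD_eq (j : Nat) (hj : j < pvRules.length) :
    pvRules.getD j ([], "") = pvRules[j] := by
  rw [List.getD_eq_getElem?_getD, List.getElem?_eq_getElem hj]
  rfl

-- membership form of the take-any condition, in terms of pvMatch
lemma take_any_iff (f : String) (i : Nat) (hi : i < 9) :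
    ((pvRules.take (i+1)).any (fun r => r.1.any (fun k => PySem.Str.isIn k (PySem.Str.lower f)))) = true ↔
      ∃ j ≤ i, pvMatch j f = true := by
  have hlen : pvRules.length = 9 := by decide
  constructor
  · intro h
    rcases List.any_eq_true.mp h with ⟨r, hr, hpr⟩
    rcases List.mem_iff_getElem.mp hr with ⟨j, hj, hget⟩
    have hj' : j < i + 1 := by simp [List.length_take] at hj; omega
    have hj9 : j < pvRules.length := by simp [List.length_take, hlen] at hj; omega
    refine ⟨j, by omega, ?_⟩
    unfold pvMatch
    rw [pvRules_getD_eq j hj9]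
    rw [List.getElem_take] at hget
    rw [hget]
    exact hpr
  · rintro ⟨j, hji, hm⟩
    have hj9 : j < pvRules.length := by omega
    apply List.any_eq_true.mpr
    refine ⟨pvRules[j], ?_, ?_⟩
    · apply List.mem_iff_getElem.mpr
      refine ⟨j, by simp [List.length_take]; omega, by simp⟩
    · unfold pvMatch at hm
      rwa [pvRules_getD_eq j hj9] at hm

lemma pvBest_eq (files : List String) (k : Nat) (hk : k < 9)
    (hlow : ∀ j < k, ∀ f ∈ files, pvMatch j f = false)
    (hhit : ∃ f ∈ files, pvMatch k f = true) :
    pvBest files = k := by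
  have hle : pvBest files ≤ k := by
    rcases hhit with ⟨f, hf, hm⟩
    exact (pvBest_le_iff files k).mpr (Or.inr ⟨f, hf, (take_any_iff f k hk).mpr ⟨k, le_refl k, hm⟩⟩)
  rcases Nat.lt_or_ge (pvBest files) k with h | h
  · exfalso
    rcases (pvBest_le_iff files (k-1)).mp (by omega) with h9 | ⟨f, hf, hany⟩
    · omega
    · rcases (take_any_iff f (k-1) (by omega)).mp hany with ⟨j, hji, hm⟩
      exact absurd hm (by simp [hlow j (by omega) f hf])
  · omega

lemma pvBest_eq_nine (files : List String)
    (hlow : ∀ j < 9, ∀ f ∈ files, pvMatch j f = false) :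
    pvBest files = 9 := by
  have hle : pvBest files ≤ 9 := (pvBest_le_iff files 9).mpr (Or.inl (le_refl 9))
  have hn : ¬ pvBest files ≤ 8 := by
    intro h
    rcases (pvBest_le_iff files 8).mp h with h9 | ⟨f, hf, hany⟩
    · omega
    · rcases (take_any_iff f 8 (by omega)).mp hany with ⟨j, hji, hm⟩
      exact absurd hm (by simp [hlow j (by omega) f hf])
  omega

lemma any_map_true (files : List String) (p : String → Bool)
    (h : (files.map PySem.Str.lower).any p = true) :
    ∃ f ∈ files, p (PySem.Str.lower f) = true := by
  rcases List.any_eq_true.mp h with ⟨g, hg, hp⟩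
  rcases List.mem_map.mp hg with ⟨f, hf, rfl⟩
  exact ⟨f, hf, hp⟩

lemma any_map_false (files : List String) (p : String → Bool)
    (h : ¬ (files.map PySem.Str.lower).any p = true) :
    ∀ f ∈ files, p (PySem.Str.lower f) = false := by
  intro f hf
  rcases hp : p (PySem.Str.lower f) with _ | _
  · rfl
  · exact absurd (List.any_eq_true.mpr ⟨PySem.Str.lower f, List.mem_map.mpr ⟨f, hf, rfl⟩, hp⟩) h

-- ===== VERDICT (by name: the statement is the Claim_ definition above) =====
theorem analyze_file_names_py_spec : Claim_equal_analyze_file_names_py := by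
  intro files _
  unfold Spec_analyze_file_names_py
  have m0 : ∀ f, pvMatch 0 f = (PySem.Str.isIn "route" (PySem.Str.lower f) || PySem.Str.isIn "endpoint" (PySem.Str.lower f)) := by
    intro f; simp [pvMatch, pvRules]
  have m1 : ∀ f, pvMatch 1 f = PySem.Str.isIn "service" (PySem.Str.lower f) := by
    intro f; simp [pvMatch, pvRules]
  have m2 : ∀ f, pvMatch 2 f = (PySem.Str.isIn "repository" (PySem.Str.lower f) || PySem.Str.isIn "repo" (PySem.Str.lower f)) := by
    intro f; simp [pvMatch, pvRules]
  have m3 : ∀ f, pvMatch 3 f = (PySem.Str.isIn "model" (PySem.Str.lower f) || PySem.Str.isIn "entity" (PySem.Str.lower f)) := by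
    intro f; simp [pvMatch, pvRules]
  have m4 : ∀ f, pvMatch 4 f = PySem.Str.isIn "controller" (PySem.Str.lower f) := by
    intro f; simp [pvMatch, pvRules]
  have m5 : ∀ f, pvMatch 5 f = PySem.Str.isIn "middleware" (PySem.Str.lower f) := by
    intro f; simp [pvMatch, pvRules]
  have m6 : ∀ f, pvMatch 6 f = PySem.Str.isIn "hook" (PySem.Str.lower f) := by
    intro f; simp [pvMatch, pvRules]
  have m7 : ∀ f, pvMatch 7 f = (PySem.Str.isIn "context" (PySem.Str.lower f) || PySem.Str.isIn "provider" (PySem.Str.lower f)) := by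
    intro f; simp [pvMatch, pvRules]
  have m8 : ∀ f, pvMatch 8 f = (PySem.Str.isIn "util" (PySem.Str.lower f) || PySem.Str.isIn "helper" (PySem.Str.lower f)) := by
    intro f; simp [pvMatch, pvRules]
  simp only [analyze_file_names_py, analyze_file_names_py_alt]
  by_cases h0 : (files.map PySem.Str.lower).any (fun f => PySem.Str.isIn "route" f || PySem.Str.isIn "endpoint" f) = true
  · rw [if_pos h0]
    have hb : pvBest files = 0 := by
      apply pvBest_eq files 0 (by omega) (by omega)
      rcases any_map_true _ _ h0 with ⟨f, hf, hp⟩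
      exact ⟨f, hf, by rw [m0]; exact hp⟩
    rw [hb]; rfl
  · rw [if_neg h0]
    have h0' := any_map_false _ _ h0
    by_cases h1 : (files.map PySem.Str.lower).any (fun f => PySem.Str.isIn "service" f) = true
    · rw [if_pos h1]
      have hb : pvBest files = 1 := by
        apply pvBest_eq files 1 (by omega)
        · intro j hj f hf
          interval_cases j
          · rw [m0]; exact h0' f hf
        · rcases any_map_true _ _ h1 with ⟨f, hf, hp⟩
          exact ⟨f, hf, by rw [m1]; exact hp⟩
      rw [hb]; rfl
    · rw [if_neg h1]
      have h1' := any_map_false _ _ h1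
      by_cases h2 : (files.map PySem.Str.lower).any (fun f => PySem.Str.isIn "repository" f || PySem.Str.isIn "repo" f) = true
      · rw [if_pos h2]
        have hb : pvBest files = 2 := by
          apply pvBest_eq files 2 (by omega)
          · intro j hj f hf
            interval_cases j
            · rw [m0]; exact h0' f hf
            · rw [m1]; exact h1' f hf
          · rcases any_map_true _ _ h2 with ⟨f, hf, hp⟩
            exact ⟨f, hf, by rw [m2]; exact hp⟩
        rw [hb]; rfl
      · rw [if_neg h2]
        have h2' := any_map_false _ _ h2
        by_cases h3 : (files.map PySem.Str.lower).any (fun f => PySem.Str.isIn "model" f || PySem.Str.isIn "entity" f) = true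
        · rw [if_pos h3]
          have hb : pvBest files = 3 := by
            apply pvBest_eq files 3 (by omega)
            · intro j hj f hf
              interval_cases j
              · rw [m0]; exact h0' f hf
              · rw [m1]; exact h1' f hf
              · rw [m2]; exact h2' f hf
            · rcases any_map_true _ _ h3 with ⟨f, hf, hp⟩
              exact ⟨f, hf, by rw [m3]; exact hp⟩
          rw [hb]; rfl
        · rw [if_neg h3]
          have h3' := any_map_false _ _ h3
          by_cases h4 : (files.map PySem.Str.lower).any (fun f => PySem.Str.isIn "controller" f) = true
          · rw [if_pos h4]
            have hb : pvBest files = 4 := by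
              apply pvBest_eq files 4 (by omega)
              · intro j hj f hf
                interval_cases j
                · rw [m0]; exact h0' f hf
                · rw [m1]; exact h1' f hf
                · rw [m2]; exact h2' f hf
                · rw [m3]; exact h3' f hf
              · rcases any_map_true _ _ h4 with ⟨f, hf, hp⟩
                exact ⟨f, hf, by rw [m4]; exact hp⟩
            rw [hb]; rfl
          · rw [if_neg h4]
            have h4' := any_map_false _ _ h4
            by_cases h5 : (files.map PySem.Str.lower).any (fun f => PySem.Str.isIn "middleware" f) = true
            · rw [if_pos h5]
              have hb : pvBest files = 5 := by
                apply pvBest_eq files 5 (by omega)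
                · intro j hj f hf
                  interval_cases j
                  · rw [m0]; exact h0' f hf
                  · rw [m1]; exact h1' f hf
                  · rw [m2]; exact h2' f hf
                  · rw [m3]; exact h3' f hf
                  · rw [m4]; exact h4' f hf
                · rcases any_map_true _ _ h5 with ⟨f, hf, hp⟩
                  exact ⟨f, hf, by rw [m5]; exact hp⟩
              rw [hb]; rfl
            · rw [if_neg h5]
              have h5' := any_map_false _ _ h5
              by_cases h6 : (files.map PySem.Str.lower).any (fun f => PySem.Str.isIn "hook" f) = true
              · rw [if_pos h6]
                have hb : pvBest files = 6 := by
                  apply pvBest_eq files 6 (by omega)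
                  · intro j hj f hf
                    interval_cases j
                    · rw [m0]; exact h0' f hf
                    · rw [m1]; exact h1' f hf
                    · rw [m2]; exact h2' f hf
                    · rw [m3]; exact h3' f hf
                    · rw [m4]; exact h4' f hf
                    · rw [m5]; exact h5' f hf
                  · rcases any_map_true _ _ h6 with ⟨f, hf, hp⟩
                    exact ⟨f, hf, by rw [m6]; exact hp⟩
                rw [hb]; rfl
              · rw [if_neg h6]
                have h6' := any_map_false _ _ h6
                by_cases h7 : (files.map PySem.Str.lower).any (fun f => PySem.Str.isIn "context" f || PySem.Str.isIn "provider" f) = true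
                · rw [if_pos h7]
                  have hb : pvBest files = 7 := by
                    apply pvBest_eq files 7 (by omega)
                    · intro j hj f hf
                      interval_cases j
                      · rw [m0]; exact h0' f hf
                      · rw [m1]; exact h1' f hf
                      · rw [m2]; exact h2' f hf
                      · rw [m3]; exact h3' f hf
                      · rw [m4]; exact h4' f hf
                      · rw [m5]; exact h5' f hf
                      · rw [m6]; exact h6' f hf
                    · rcases any_map_true _ _ h7 with ⟨f, hf, hp⟩
                      exact ⟨f, hf, by rw [m7]; exact hp⟩
                  rw [hb]; rfl
                · rw [if_neg h7]
                  have h7' := any_map_false _ _ h7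
                  by_cases h8 : (files.map PySem.Str.lower).any (fun f => PySem.Str.isIn "util" f || PySem.Str.isIn "helper" f) = true
                  · rw [if_pos h8]
                    have hb : pvBest files = 8 := by
                      apply pvBest_eq files 8 (by omega)
                      · intro j hj f hf
                        interval_cases j
                        · rw [m0]; exact h0' f hf
                        · rw [m1]; exact h1' f hf
                        · rw [m2]; exact h2' f hf
                        · rw [m3]; exact h3' f hf
                        · rw [m4]; exact h4' f hf
                        · rw [m5]; exact h5' f hf
                        · rw [m6]; exact h6' f hf
                        · rw [m7]; exact h7' f hf
                      · rcases any_map_true _ _ h8 with ⟨f, hf, hp⟩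
                        exact ⟨f, hf, by rw [m8]; exact hp⟩
                    rw [hb]; rfl
                  · rw [if_neg h8]
                    have h8' := any_map_false _ _ h8
                    have hb : pvBest files = 9 := by
                      apply pvBest_eq_nine
                      intro j hj f hf
                      interval_cases j
                      · rw [m0]; exact h0' f hf
                      · rw [m1]; exact h1' f hf
                      · rw [m2]; exact h2' f hf
                      · rw [m3]; exact h3' f hf
                      · rw [m4]; exact h4' f hf
                      · rw [m5]; exact h5' f hf
                      · rw [m6]; exact h6' f hf
                      · rw [m7]; exact h7' f hf
                      · rw [m8]; exact h8' f hf
                    rw [hb]; rfl
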